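-- pv_equiv track=rewrite | github.com/christopher-burke/warmups | python/misc/maximum_sum_increasing_subsequence.py | max_sum_subsequence
-- ===== SOURCE A (Python) =====
-- def max_sum_subsequence(A):
--     """Find the maximum sum increasing subsequence."""
--     increasing_subsequences = []
--     for i, item in enumerate(A):
--         remaining_sequence = A[i+1:]
--         subsequence_ = [item]
--         for j in remaining_sequence:
--             if j > subsequence_[-1]:
--                 subsequence_.append(j)
--             else:
--                 increasing_subsequences.append(tuple(subsequence_))
--                 if j > item:
--                     subsequence_ = [item, j]
--                 else:
--                     subsequence_ = [item]
--         increasing_subsequences.append(tuple(subsequence_))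
--     max_sum = 0
--     for x in set(increasing_subsequences):
--         test_max_sum = sum(x)
--         max_sum = test_max_sum if test_max_sum > max_sum else max_sum
--     return max_sum
-- ===== SOURCE B (Python) =====
-- def max_sum_subsequence(A):
--     """Find the maximum sum increasing subsequence (same greedy chains as A),
--     as a single fold over suffixes: no list of subsequences and no set is built."""
--     best = 0
--     rest = A
--     while rest:
--         item, rest = rest[0], rest[1:]
--         cur = last = item
--         for j in rest:
--             if j > last:
--                 cur += j
--                 last = j
--             else:
--                 if cur > best:
--                     best = cur
--                 if j > item:
--                     cur, last = item + j, j
--                 else: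
--                     cur, last = item, item
--         if cur > best:
--             best = cur
--     return best
-- ===== Notes on version B (the rewrite author's own statement) =====
-- stated objective: simpler
-- what changed: Instead of materializing every greedy chain as a tuple, collecting them in a list, deduplicating through a set and then scanning for the maximal sum, B keeps only a running sum and last element of the current chain and folds the maximum on the fly.
import Mathlib
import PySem

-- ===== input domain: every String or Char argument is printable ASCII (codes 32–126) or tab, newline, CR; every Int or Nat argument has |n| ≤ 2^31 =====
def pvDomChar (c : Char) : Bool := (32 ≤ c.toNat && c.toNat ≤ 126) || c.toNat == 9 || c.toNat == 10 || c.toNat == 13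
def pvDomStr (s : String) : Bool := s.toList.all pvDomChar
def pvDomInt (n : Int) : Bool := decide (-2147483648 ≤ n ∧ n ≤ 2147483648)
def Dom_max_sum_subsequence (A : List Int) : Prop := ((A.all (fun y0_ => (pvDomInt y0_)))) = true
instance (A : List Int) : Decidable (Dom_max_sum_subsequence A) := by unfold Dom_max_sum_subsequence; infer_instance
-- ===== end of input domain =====

-- B replaces A's build-all-chains / set-dedup / scan-for-max pipeline by a single fold
-- keeping only the current chain's running sum and last element (simpler, O(1) extra space).

-- ===== PORT A =====
-- inner 'for j in remaining_sequence' loop; state = (increasing_subsequences, subsequence_).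
-- subsequence_[-1]: the chain is never empty in A, so the .getD 0 default is never used.
def msInner (item : Int) : List Int → List (List Int) × List Int → List (List Int) × List Int
  | [], st => st
  | j :: rest, (subs, chain) =>
    if j > (PySem.List.pyGet? chain (-1)).getD 0 then
      msInner item rest (subs, chain ++ [j])
    else if j > item then
      msInner item rest (subs ++ [chain], [item, j])
    else
      msInner item rest (subs ++ [chain], [item])

-- outer 'for i, item in enumerate(A)' loop
def msOuter (A : List Int) : List (Int × Int) → List (List Int) → List (List Int)
  | [], subs => subs
  | (i, item) :: rest, subs =>
    let remaining := PySem.List.slice A (some (i + 1)) none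
    let (subs', chain') := msInner item remaining (subs, [item])
    msOuter A rest (subs' ++ [chain'])

def max_sum_subsequence (A : List Int) : Int :=
  let subs := msOuter A (PySem.List.enumerate A) []
  (PySem.Set.ofList subs).foldl (fun m x => if x.sum > m then x.sum else m) 0

-- ===== PORT B =====
-- inner 'for j in rest' loop of Source B; state = (best, cur, last)
def msAltInner (item : Int) : List Int → Int × Int × Int → Int × Int × Int
  | [], st => st
  | j :: rest, (best, cur, last) =>
    if j > last then
      msAltInner item rest (best, cur + j, j)
    else
      let best' := if cur > best then cur else best
      if j > item then
        msAltInner item rest (best', item + j, j)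
      else
        msAltInner item rest (best', item, item)

-- Source B's 'while rest' loop over suffixes
def msAltOuter : Int → List Int → Int
  | best, [] => best
  | best, item :: rest =>
    let (b, cur, _) := msAltInner item rest (best, item, item)
    msAltOuter (if cur > b then cur else b) rest

def max_sum_subsequence_alt (A : List Int) : Int := msAltOuter 0 A

-- ===== PRECONDITION & SPEC =====
def Spec_max_sum_subsequence (A : List Int) (out : Int) : Prop := out = max_sum_subsequence_alt A
instance (A : List Int) (out : Int) : Decidable (Spec_max_sum_subsequence A out) := by unfold Spec_max_sum_subsequence; infer_instance

-- ===== CLAIM (what is proved, stated in full; the proofs are below) =====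
def Claim_equal_max_sum_subsequence : Prop := ∀ (A : List Int), Dom_max_sum_subsequence A → Spec_max_sum_subsequence A (max_sum_subsequence A)

-- ===== LEMMAS AND PROOFS =====

-- the value A reads as subsequence_[-1]
def chainLast (l : List Int) : Int := (PySem.List.pyGet? l (-1)).getD 0

-- the max-accumulation step shared by A's final scan and B's running best
def mstep (m s : Int) : Int := if s > m then s else m

theorem chainLast_append (l : List Int) (j : Int) : chainLast (l ++ [j]) = j := by
  simp [chainLast, PySem.List.pyGet?_neg_one_append_singleton]

theorem chainLast_single (a : Int) : chainLast [a] = a := by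
  simp [chainLast, PySem.List.pyGet?_neg_one]

theorem chainLast_pair (a b : Int) : chainLast [a, b] = b := by
  simp [chainLast, PySem.List.pyGet?_neg_one]

theorem mstep_eq_max (m s : Int) : mstep m s = max m s := by
  unfold mstep; rw [max_def]; split_ifs <;> omega

-- inner-loop invariant: A's inner loop appends some chains delta to subs and ends with
-- chain'; B's inner loop starting from (best, sum chain, last chain) accumulates exactly
-- the maxima of the sums of delta and tracks (sum chain', last chain').
theorem inner_spec (rest : List Int) : ∀ (item : Int) (subs : List (List Int))
    (chain : List Int) (best : Int), chain ≠ [] →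
    ∃ delta chain',
      msInner item rest (subs, chain) = (subs ++ delta, chain') ∧ chain' ≠ [] ∧
      msAltInner item rest (best, chain.sum, chainLast chain) =
        ((delta.map List.sum).foldl mstep best, chain'.sum, chainLast chain') := by
  induction rest with
  | nil =>
    intro item subs chain best h
    exact ⟨[], chain, by simp [msInner], h, by simp [msAltInner]⟩
  | cons j rest ih =>
    intro item subs chain best h
    by_cases hj : j > chainLast chain
    · obtain ⟨delta, chain', h1, h2, h3⟩ := ih item subs (chain ++ [j]) best (by simp)
      refine ⟨delta, chain', ?_, h2, ?_⟩
      · rw [show msInner item (j :: rest) (subs, chain)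
            = msInner item rest (subs, chain ++ [j]) by
          simp only [msInner]; rw [if_pos (by exact hj)]]
        exact h1
      · rw [show msAltInner item (j :: rest) (best, chain.sum, chainLast chain)
            = msAltInner item rest (best, chain.sum + j, j) by
          simp only [msAltInner]; rw [if_pos hj]]
        rw [chainLast_append] at h3
        simp only [List.sum_append, List.sum_cons, List.sum_nil, add_zero] at h3
        exact h3
    · by_cases hi : j > item
      · obtain ⟨delta, chain', h1, h2, h3⟩ :=
          ih item (subs ++ [chain]) [item, j] (mstep best chain.sum) (by simp)
        refine ⟨chain :: delta, chain', ?_, h2, ?_⟩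
        · rw [show msInner item (j :: rest) (subs, chain)
              = msInner item rest (subs ++ [chain], [item, j]) by
            simp only [msInner]; rw [if_neg (by exact hj), if_pos hi]]
          rw [h1]; simp
        · rw [show msAltInner item (j :: rest) (best, chain.sum, chainLast chain)
              = msAltInner item rest (mstep best chain.sum, item + j, j) by
            simp only [msAltInner]; rw [if_neg hj, if_pos hi]; rfl]
          rw [chainLast_pair] at h3
          simp only [List.sum_cons, List.sum_nil, add_zero] at h3
          rw [h3]; simp
      · obtain ⟨delta, chain', h1, h2, h3⟩ :=
          ih item (subs ++ [chain]) [item] (mstep best chain.sum) (by simp)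
        refine ⟨chain :: delta, chain', ?_, h2, ?_⟩
        · rw [show msInner item (j :: rest) (subs, chain)
              = msInner item rest (subs ++ [chain], [item]) by
            simp only [msInner]; rw [if_neg (by exact hj), if_neg hi]]
          rw [h1]; simp
        · rw [show msAltInner item (j :: rest) (best, chain.sum, chainLast chain)
              = msAltInner item rest (mstep best chain.sum, item, item) by
            simp only [msAltInner]; rw [if_neg hj, if_neg hi]; rfl]
          rw [chainLast_single] at h3
          simp only [List.sum_cons, List.sum_nil, add_zero] at h3
          rw [h3]; simp

-- outer-loop invariant, over the suffix t = A.drop k.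
theorem outer_spec (t : List Int) : ∀ (A : List Int) (k : Nat) (subs : List (List Int)) (best : Int),
    A.drop k = t →
    ∃ delta, msOuter A (PySem.List.enumerate t (k : Int)) subs = subs ++ delta ∧
      msAltOuter best t = (delta.map List.sum).foldl mstep best := by
  induction t with
  | nil =>
    intro A k subs best _
    exact ⟨[], by simp [msOuter, PySem.List.enumerate], by simp [msAltOuter]⟩
  | cons item rest ih =>
    intro A k subs best hdrop
    have hrest : A.drop (k + 1) = rest := by
      rw [show k + 1 = k + 1 from rfl, ← List.drop_drop, hdrop]; rfl
    obtain ⟨delta1, chain', h1, h2, h3⟩ :=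
      inner_spec rest item subs [item] best (by simp)
    obtain ⟨delta2, g1, g2⟩ :=
      ih A (k + 1) ((subs ++ delta1) ++ [chain'])
        (mstep ((delta1.map List.sum).foldl mstep best) chain'.sum) hrest
    refine ⟨delta1 ++ chain' :: delta2, ?_, ?_⟩
    · rw [PySem.List.enumerate_cons]
      show msOuter A ((↑k, item) :: PySem.List.enumerate rest (↑k + 1)) subs = _
      rw [show msOuter A ((↑k, item) :: PySem.List.enumerate rest (↑k + 1)) subs
          = msOuter A (PySem.List.enumerate rest (↑k + 1))
              ((msInner item (PySem.List.slice A (some ((k : Int) + 1)) none) (subs, [item])).1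
                ++ [(msInner item (PySem.List.slice A (some ((k : Int) + 1)) none) (subs, [item])).2]) by
        simp only [msOuter]]
      rw [show PySem.List.slice A (some ((k : Int) + 1)) none = rest by
        rw [show ((k : Int) + 1) = ((k + 1 : Nat) : Int) by push_cast; ring,
            PySem.List.slice_from_natCast, hrest]]
      rw [h1]
      rw [show ((k : Int) + 1) = ((k + 1 : Nat) : Int) by push_cast; ring]
      rw [g1]; simp
    · rw [show msAltOuter best (item :: rest)
          = msAltOuter (mstep (msAltInner item rest (best, item, item)).1
              (msAltInner item rest (best, item, item)).2.1) rest by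
        simp only [msAltOuter, mstep]]
      have h3' : msAltInner item rest (best, item, item) =
          ((delta1.map List.sum).foldl mstep best, chain'.sum, chainLast chain') := by
        have := h3
        rw [show ([item] : List Int).sum = item by simp, chainLast_single] at this
        exact this
      rw [h3', g2]; simp [List.foldl]

-- foldl with the if-step is foldl max
theorem foldl_mstep_eq_max (l : List Int) : ∀ a : Int, l.foldl mstep a = l.foldl max a := by
  induction l with
  | nil => intro a; rfl
  | cons x l ih => intro a; simp only [List.foldl, mstep_eq_max]; exact ih _

theorem init_le_foldl_max (l : List Int) : ∀ a : Int, a ≤ l.foldl max a := by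
  induction l with
  | nil => intro a; simp
  | cons x l ih => intro a; exact le_trans (le_max_left a x) (ih _)

theorem mem_le_foldl_max (l : List Int) : ∀ (a x : Int), x ∈ l → x ≤ l.foldl max a := by
  induction l with
  | nil => intro a x h; simp at h
  | cons y l ih =>
    intro a x h
    rcases List.mem_cons.mp h with rfl | h
    · exact le_trans (le_max_right a x) (init_le_foldl_max l _)
    · exact ih _ x h

theorem foldl_max_le (l : List Int) : ∀ (a c : Int), a ≤ c → (∀ x ∈ l, x ≤ c) →
    l.foldl max a ≤ c := by
  induction l with
  | nil => intro a c h _; simpa using h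
  | cons y l ih =>
    intro a c h hm
    exact ih _ c (max_le h (hm y (by simp))) (fun x hx => hm x (by simp [hx]))

theorem foldl_max_congr_mem (l1 l2 : List Int) (a : Int)
    (h : ∀ x, x ∈ l1 ↔ x ∈ l2) : l1.foldl max a = l2.foldl max a := by
  apply le_antisymm
  · exact foldl_max_le l1 a _ (init_le_foldl_max l2 a)
      (fun x hx => mem_le_foldl_max l2 a x ((h x).mp hx))
  · exact foldl_max_le l2 a _ (init_le_foldl_max l1 a)
      (fun x hx => mem_le_foldl_max l1 a x ((h x).mpr hx))

-- ===== VERDICT (by name: the statement is the Claim_ definition above) =====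
theorem max_sum_subsequence_spec : Claim_equal_max_sum_subsequence := by
  intro A _
  unfold Spec_max_sum_subsequence max_sum_subsequence max_sum_subsequence_alt
  obtain ⟨delta, h1, h2⟩ := outer_spec A A 0 [] 0 (by simp)
  rw [show PySem.List.enumerate A = PySem.List.enumerate A ((0 : Nat) : Int) by norm_num]
  rw [h1, h2]
  show (PySem.Set.ofList delta).foldl (fun m x => if x.sum > m then x.sum else m) 0 = _
  rw [show (PySem.Set.ofList delta).foldl (fun m x => if x.sum > m then x.sum else m) 0
      = ((PySem.Set.ofList delta).map List.sum).foldl mstep 0 by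
    rw [List.foldl_map]; rfl]
  rw [foldl_mstep_eq_max, foldl_mstep_eq_max]
  apply foldl_max_congr_mem
  intro x
  simp only [List.mem_map]
  constructor
  · rintro ⟨c, hc, rfl⟩; exact ⟨c, (PySem.Set.mem_ofList _ _).mp hc, rfl⟩
  · rintro ⟨c, hc, rfl⟩; exact ⟨c, (PySem.Set.mem_ofList _ _).mpr hc, rfl⟩
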